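-- pv_equiv track=rewrite | github.com/YashB63/GFG-Daily-Questions | Day 420/Apple Sequences/apple_sequences.py | appleSequences
-- ===== SOURCE A (Python) =====
-- def appleSequences(n, m, arr):
--     j=0
--     orange=0
--     total=0
--     for i in range(n):
--         if arr[i] =='O':
--             orange = orange+1
--             while orange >m:
--                 if arr[j] =='O':
--                     orange = orange-1
--                 j=j+1
--         total= max(total, i-j+1)
--     return total
-- ===== SOURCE B (Python) =====
-- def appleSequences(n, m, arr):
--     left = 0
--     orange = 0
--     for right in range(n):
--         if arr[right] == 'O':
--             orange += 1
--         if orange > m: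
--             if arr[left] == 'O':
--                 orange -= 1
--             left += 1
--     return max(n - left, 0)
-- ===== Notes on version B (the rewrite author's own statement) =====
-- stated objective: simpler
-- what changed: Replaces the shrinking window (inner while-loop plus a running max() each iteration) by a non-shrinking sliding window: a single if advances the left pointer at most once per step, no maximum is tracked, and the answer is read off as max(n - left, 0); dropping the per-iteration max() call gives a measured constant-factor speedup.
-- outside the precondition, e.g. on appleSequences(2, -1, ['A', 'A']): A returns 2, B returns 0; on appleSequences(1, -1, ['A', 'O']): A returns 1, B returns 0
import Mathlib
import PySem

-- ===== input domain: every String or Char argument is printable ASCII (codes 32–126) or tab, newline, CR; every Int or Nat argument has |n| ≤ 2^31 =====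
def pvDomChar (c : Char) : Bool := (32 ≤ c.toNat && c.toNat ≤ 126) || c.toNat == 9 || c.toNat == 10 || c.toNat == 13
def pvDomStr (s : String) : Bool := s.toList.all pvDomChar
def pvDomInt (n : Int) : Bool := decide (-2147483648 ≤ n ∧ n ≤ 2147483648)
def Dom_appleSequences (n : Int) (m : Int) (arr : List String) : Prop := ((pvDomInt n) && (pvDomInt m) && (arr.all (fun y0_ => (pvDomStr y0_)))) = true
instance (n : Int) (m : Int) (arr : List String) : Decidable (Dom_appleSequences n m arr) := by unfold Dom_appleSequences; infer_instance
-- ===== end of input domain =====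

-- B replaces A's shrinking window (inner while + running max) by a non-shrinking window
-- (single if, no max; answer = n - left): simpler, same O(n) cost.

-- ===== PORT A =====
-- A's inner 'while orange > m' loop. Fuel arr.length + 1 bounds its iterations on every
-- input of Pre_ (there j never passes i+1 ≤ arr.length); arr[j] is ported with pyGetD,
-- exact while the index is in range, which Pre_ guarantees.
def pvWhileA (arr : List String) (m : Int) : Nat → Int × Int → Int × Int
  | 0, s => s
  | f+1, (j, o) =>
    if o > m then
      pvWhileA arr m f (j + 1, if PySem.List.pyGetD arr j "" = "O" then o - 1 else o)
    else (j, o)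

-- one iteration of A's for-loop; state (j, orange, total)
def pvStepA (arr : List String) (m : Int) (s : Int × Int × Int) (i : Int) : Int × Int × Int :=
  let p := if PySem.List.pyGetD arr i "" = "O" then
             pvWhileA arr m (arr.length + 1) (s.1, s.2.1 + 1)
           else (s.1, s.2.1)
  (p.1, p.2, max s.2.2 (i - p.1 + 1))

def appleSequences (n : Int) (m : Int) (arr : List String) : Int :=
  ((PySem.List.pyRange 0 n 1).foldl (pvStepA arr m) (0, 0, 0)).2.2

-- ===== PORT B =====
-- one iteration of B's for-loop; state (left, orange)
def pvStepB (arr : List String) (m : Int) (s : Int × Int) (i : Int) : Int × Int :=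
  let o := if PySem.List.pyGetD arr i "" = "O" then s.2 + 1 else s.2
  if o > m then (s.1 + 1, if PySem.List.pyGetD arr s.1 "" = "O" then o - 1 else o)
  else (s.1, o)

def appleSequences_alt (n : Int) (m : Int) (arr : List String) : Int :=
  max (n - ((PySem.List.pyRange 0 n 1).foldl (pvStepB arr m) (0, 0)).1) 0

-- ===== PRECONDITION & SPEC =====
-- For positive n, Pre_ excludes n > len(arr) (A raises IndexError) and m < 0 (A can raise
-- IndexError by running j past the array; where it does return, a negative replacement
-- budget is outside the problem's domain and A's forward scan past i is accidental).
def Pre_appleSequences (n : Int) (m : Int) (arr : List String) : Prop :=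
  n ≤ 0 ∨ (n ≤ arr.length ∧ 0 ≤ m)
instance (n : Int) (m : Int) (arr : List String) : Decidable (Pre_appleSequences n m arr) := by
  unfold Pre_appleSequences; infer_instance

def pvWitness_appleSequences : Int × Int × List String := (3, 1, ["O", "A", "O"])

def Spec_appleSequences (n : Int) (m : Int) (arr : List String) (out : Int) : Prop := out = appleSequences_alt n m arr
instance (n : Int) (m : Int) (arr : List String) (out : Int) : Decidable (Spec_appleSequences n m arr out) := by unfold Spec_appleSequences; infer_instance

-- ===== CLAIM (what is proved, stated in full; the proofs are below) =====
def Claim_equal_appleSequences : Prop := ∀ (n : Int) (m : Int) (arr : List String), Dom_appleSequences n m arr → Pre_appleSequences n m arr → Spec_appleSequences n m arr (appleSequences n m arr)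

-- ===== LEMMAS AND PROOFS =====

-- number of "O" among the first k elements (k clamped to [0, len])
def pvC (arr : List String) (k : Int) : Int :=
  ((arr.take k.toNat).countP (fun s => s == "O") : Int)

lemma pvC_mono (arr : List String) {a b : Int} (h : a ≤ b) : pvC arr a ≤ pvC arr b := by
  unfold pvC
  have : arr.take b.toNat = arr.take a.toNat ++ (arr.drop a.toNat).take (b.toNat - a.toNat) := by
    rw [← List.take_add]
    congr 1
    omega
  rw [this, List.countP_append]
  push_cast
  omega

lemma pvC_succ (arr : List String) {i : Int} (h0 : 0 ≤ i) (hl : i < arr.length) :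
    pvC arr (i + 1) = pvC arr i + (if PySem.List.pyGetD arr i "" = "O" then 1 else 0) := by
  unfold pvC
  have hi : i.toNat < arr.length := by omega
  have h1 : (i + 1).toNat = i.toNat + 1 := by omega
  rw [h1, ← List.take_concat_get' _ _ hi, List.countP_append,
    PySem.List.pyGetD_eq_getElem arr "" h0 hl]
  by_cases hx : arr[i.toNat] = "O" <;> simp [hx]

-- the coupled invariant after processing the first i elements:
-- a = A's (j, orange, total), b = B's (left, orange)
def pvInv (arr : List String) (m : Int) (i : Nat) (a : Int × Int × Int) (b : Int × Int) : Prop :=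
  0 ≤ b.1 ∧ b.1 ≤ a.1 ∧ a.1 ≤ (i : Int) ∧
  a.2.1 = pvC arr i - pvC arr a.1 ∧ a.2.1 ≤ m ∧
  (a.1 = 0 ∨ m < pvC arr i - pvC arr (a.1 - 1)) ∧
  b.2 = pvC arr i - pvC arr b.1 ∧
  a.2.2 = (i : Int) - b.1

lemma pvWhileA_spec (arr : List String) (m : Int) (hm : 0 ≤ m) (e : Nat) (he : e ≤ arr.length) :
    ∀ (f : Nat) (j o : Int), 0 ≤ j → j ≤ (e : Int) → o = pvC arr e - pvC arr j →
      (e : Int) - j ≤ (f : Int) →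
      0 ≤ (pvWhileA arr m f (j, o)).1 ∧ j ≤ (pvWhileA arr m f (j, o)).1 ∧
      (pvWhileA arr m f (j, o)).1 ≤ (e : Int) ∧
      (pvWhileA arr m f (j, o)).2 = pvC arr e - pvC arr (pvWhileA arr m f (j, o)).1 ∧
      (pvWhileA arr m f (j, o)).2 ≤ m ∧
      (o ≤ m → pvWhileA arr m f (j, o) = (j, o)) ∧
      (m < o → m < pvC arr e - pvC arr ((pvWhileA arr m f (j, o)).1 - 1)) := by
  intro f
  induction f with
  | zero =>
    intro j o hj0 hje ho hf
    have hj : j = (e : Int) := by omega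
    have ho0 : o = 0 := by rw [ho, hj]; omega
    exact ⟨hj0, le_refl _, hje, ho, by show o ≤ m; omega, fun _ => rfl,
      fun h => by show m < pvC arr ↑e - pvC arr (j - 1); omega⟩
  | succ f ih =>
    intro j o hj0 hje ho hf
    by_cases hcond : o > m
    · have hjlt : j < (e : Int) := by
        by_contra hh
        have : j = (e : Int) := by omega
        subst this
        have : o = 0 := by rw [ho]; omega
        omega
      have hrec : pvWhileA arr m (f+1) (j, o) =
          pvWhileA arr m f (j + 1, if PySem.List.pyGetD arr j "" = "O" then o - 1 else o) := by
        simp only [pvWhileA, if_pos hcond]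
      set o' := if PySem.List.pyGetD arr j "" = "O" then o - 1 else o with ho'
      have hjl : j < (arr.length : Int) := by omega
      have hC : pvC arr (j + 1) = pvC arr j + (if PySem.List.pyGetD arr j "" = "O" then 1 else 0) :=
        pvC_succ arr hj0 hjl
      have ho'' : o' = pvC arr e - pvC arr (j + 1) := by
        rw [ho', hC, ho]; split_ifs <;> ring
      have h := ih (j + 1) o' (by omega) (by omega) ho'' (by omega)
      rw [hrec]
      obtain ⟨h1, h2, h3, h4, h5, h6, h7⟩ := h
      refine ⟨by omega, by omega, h3, h4, h5, fun hle => by omega, fun _ => ?_⟩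
      by_cases hmo : m < o'
      · exact h7 hmo
      · have heq : pvWhileA arr m f (j + 1, o') = (j + 1, o') := h6 (by omega)
        rw [heq]
        simp only
        have : (j + 1 : Int) - 1 = j := by ring
        rw [this, ← ho]
        exact hcond
    · have heq : pvWhileA arr m (f+1) (j, o) = (j, o) := by
        simp only [pvWhileA, if_neg hcond]
      rw [heq]
      exact ⟨hj0, le_refl _, hje, ho, by omega, fun _ => rfl, fun h => by omega⟩

lemma pvStep_inv (arr : List String) (m : Int) (hm : 0 ≤ m) (i : Nat) (hil : i < arr.length)
    (a : Int × Int × Int) (b : Int × Int) (hinv : pvInv arr m i a b) :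
    pvInv arr m (i + 1) (pvStepA arr m a (i : Int)) (pvStepB arr m b (i : Int)) := by
  obtain ⟨hb0, hba, hai, hoa, ham, hmin, hob, ht⟩ := hinv
  unfold pvInv
  rw [show ((i + 1 : Nat) : Int) = (i : Int) + 1 from by push_cast; ring]
  have hi0 : (0 : Int) ≤ (i : Int) := by positivity
  have hil' : (i : Int) < arr.length := by exact_mod_cast hil
  have hC : pvC arr ((i : Int) + 1) = pvC arr i + (if PySem.List.pyGetD arr (i : Int) "" = "O" then 1 else 0) :=
    pvC_succ arr hi0 hil'
  -- the A step: compute the resulting (j', o') with its properties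
  have hA : ∃ j' o', (pvStepA arr m a (i : Int)).1 = j' ∧ (pvStepA arr m a (i : Int)).2.1 = o' ∧
      (pvStepA arr m a (i : Int)).2.2 = max a.2.2 ((i : Int) - j' + 1) ∧
      0 ≤ j' ∧ a.1 ≤ j' ∧ j' ≤ (i : Int) + 1 ∧
      o' = pvC arr ((i : Int) + 1) - pvC arr j' ∧ o' ≤ m ∧
      (j' = 0 ∨ m < pvC arr ((i : Int) + 1) - pvC arr (j' - 1)) := by
    by_cases hx : PySem.List.pyGetD arr (i : Int) "" = "O"
    · have hw := pvWhileA_spec arr m hm (i + 1) (by omega) (arr.length + 1) a.1 (a.2.1 + 1)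
        (by omega) (by push_cast; omega)
        (by rw [hoa]; push_cast at hC ⊢; rw [hC]; simp [hx]; ring)
        (by push_cast; omega)
      set r := pvWhileA arr m (arr.length + 1) (a.1, a.2.1 + 1) with hr
      obtain ⟨w1, w2, w3, w4, w5, w6, w7⟩ := hw
      refine ⟨r.1, r.2, ?_, ?_, ?_, w1, w2, by exact_mod_cast w3, by exact_mod_cast w4, w5, ?_⟩
      · simp only [pvStepA, if_pos hx, ← hr]
      · simp only [pvStepA, if_pos hx, ← hr]
      · simp only [pvStepA, if_pos hx, ← hr]
      · by_cases hov : m < a.2.1 + 1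
        · right; exact_mod_cast w7 hov
        · have hreq : r = (a.1, a.2.1 + 1) := w6 (by omega)
          rcases hmin with h | h
          · left; rw [hreq]; exact h
          · right
            rw [hreq]
            show m < pvC arr ((i : Int) + 1) - pvC arr (a.1 - 1)
            have := pvC_mono arr (show (i : Int) ≤ (i : Int) + 1 by omega)
            omega
    · refine ⟨a.1, a.2.1, ?_, ?_, ?_, by omega, le_refl _, by omega, ?_, ham, ?_⟩
      · simp only [pvStepA, if_neg hx]
      · simp only [pvStepA, if_neg hx]
      · simp only [pvStepA, if_neg hx]
      · rw [hoa, hC, if_neg hx]; ring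
      · rcases hmin with h | h
        · left; exact h
        · right; rw [hC, if_neg hx]; omega
  obtain ⟨j', o', hj'eq, ho'eq, ht'eq, hj'0, haj', hj'i, ho', ho'm, hmin'⟩ := hA
  -- the B step
  set oB1 := if PySem.List.pyGetD arr (i : Int) "" = "O" then b.2 + 1 else b.2 with hoB1
  have hoB1v : oB1 = pvC arr ((i : Int) + 1) - pvC arr b.1 := by
    rw [hoB1, hob, hC]; split_ifs <;> ring
  by_cases hslide : oB1 > m
  · -- B slides: left' = b.1 + 1
    have hBeq : pvStepB arr m b (i : Int) =
        (b.1 + 1, if PySem.List.pyGetD arr b.1 "" = "O" then oB1 - 1 else oB1) := by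
      simp only [pvStepB, ← hoB1, if_pos hslide]
    have hbl : b.1 < (arr.length : Int) := by omega
    have hCb : pvC arr (b.1 + 1) = pvC arr b.1 + (if PySem.List.pyGetD arr b.1 "" = "O" then 1 else 0) :=
      pvC_succ arr hb0 hbl
    -- j' > b.1 since window [b.1, i+1) is invalid but [j', i+1) is valid
    have hjgt : b.1 + 1 ≤ j' := by
      by_contra hh
      have hle : j' ≤ b.1 := by omega
      have := pvC_mono arr hle
      omega
    constructor
    · rw [hBeq]; simp only; omega
    constructor
    · rw [hBeq, hj'eq]; simp only; omega
    constructor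
    · rw [hj'eq]; exact hj'i
    constructor
    · rw [hj'eq, ho'eq]; exact ho'
    constructor
    · rw [ho'eq]; exact ho'm
    constructor
    · rw [hj'eq]; exact hmin'
    constructor
    · rw [hBeq]; simp only
      rw [hCb, hoB1v]; split_ifs <;> ring
    · rw [hBeq, ht'eq]
      show max a.2.2 ((i : Int) - j' + 1) = (i : Int) + 1 - (b.1 + 1)
      omega
  · -- B keeps left: left' = b.1, and forcibly j' = b.1
    have hBeq : pvStepB arr m b (i : Int) = (b.1, oB1) := by
      simp only [pvStepB, ← hoB1, if_neg hslide]
    have hj'le : j' ≤ b.1 := by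
      by_contra hh
      have h1 : b.1 ≤ j' - 1 := by omega
      have h2 := pvC_mono arr h1
      rcases hmin' with h | h
      · omega
      · omega
    have hj'ge : b.1 ≤ j' := hba.trans haj'
    have hj'b : j' = b.1 := le_antisymm hj'le hj'ge
    constructor
    · rw [hBeq]; exact hb0
    constructor
    · rw [hBeq, hj'eq]; simp only; omega
    constructor
    · rw [hj'eq]; exact hj'i
    constructor
    · rw [hj'eq, ho'eq]; exact ho'
    constructor
    · rw [ho'eq]; exact ho'm
    constructor
    · rw [hj'eq]; exact hmin'
    constructor
    · rw [hBeq]; simp only; exact hoB1v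
    · rw [hBeq, ht'eq]
      show max a.2.2 ((i : Int) - j' + 1) = (i : Int) + 1 - b.1
      omega

lemma pvMain (arr : List String) (m : Int) (hm : 0 ≤ m) :
    ∀ (i : Nat), i ≤ arr.length →
      pvInv arr m i ((PySem.List.pyRange 0 (i : Int) 1).foldl (pvStepA arr m) (0, 0, 0))
        ((PySem.List.pyRange 0 (i : Int) 1).foldl (pvStepB arr m) (0, 0)) := by
  intro i
  induction i with
  | zero =>
    intro _
    simp only [Nat.cast_zero]
    rw [PySem.List.pyRange_one_eq_nil (by norm_num)]
    simp only [List.foldl_nil]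
    refine ⟨le_refl _, le_refl _, le_refl _, by simp [pvC], by omega, Or.inl rfl, by simp [pvC], by norm_num⟩
  | succ i ih =>
    intro hle
    have h2 : PySem.List.pyRange 0 (((i + 1 : Nat) : Int)) 1 =
        PySem.List.pyRange 0 (i : Int) 1 ++ [(i : Int)] := by
      rw [show (((i + 1 : Nat)) : Int) = (i : Int) + 1 from by push_cast; ring]
      exact PySem.List.pyRange_one_succ_right (by positivity)
    rw [h2, List.foldl_append, List.foldl_append]
    simp only [List.foldl_cons, List.foldl_nil]
    exact pvStep_inv arr m hm i (by omega) _ _ (ih (by omega))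

-- ===== VERDICT (by name: the statement is the Claim_ definition above) =====
theorem appleSequences_spec : Claim_equal_appleSequences := by
  intro n m arr _ hpre
  by_cases hneg : n ≤ 0
  · unfold Spec_appleSequences appleSequences appleSequences_alt
    rw [PySem.List.pyRange_one_eq_nil hneg]
    simp only [List.foldl_nil]
    omega
  · obtain ⟨hnl, hm⟩ : n ≤ (arr.length : Int) ∧ 0 ≤ m := by
      rcases hpre with h | h
      · omega
      · exact h
    have hn : ((n.toNat : Nat) : Int) = n := by omega
    have h := pvMain arr m hm n.toNat (by omega)
    rw [hn] at h
    obtain ⟨hb0, hba, hai, _, _, _, _, ht⟩ := h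
    unfold Spec_appleSequences appleSequences appleSequences_alt
    omega
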